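-- pv_equiv track=rewrite | github.com/mfms-ncsu/galant-js | scripts/graphml2gph.py | get_comments
-- ===== SOURCE A (Python) =====
-- def get_comments(input_lines):
--     """
--     @return a list of strings, one for each line of comments,
--     where the comments are between <comments> and </comments>
--     @param input_lines a list of strings representing the file contents
--     """
--     comments = []
--     comment_started = False
--     for line in input_lines:
--         line_list = line.strip().split()
--         if not comment_started and len(line_list) > 0 and line_list[0] == '<comments>':
--             comment_started = True
--         elif comment_started:
--             if len(line_list) > 0 and line_list[0] == '</comments>':
--                 # reached end of comment
--                 break
--             comments.append(line.strip())
--     return comments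
-- ===== SOURCE B (Python) =====
-- def get_comments(input_lines):
--     tokens = [line.strip().split()[:1] for line in input_lines]
--     if ['<comments>'] not in tokens:
--         return []
--     start = tokens.index(['<comments>']) + 1
--     tail = tokens[start:]
--     end = start + tail.index(['</comments>']) if ['</comments>'] in tail else len(input_lines)
--     return [line.strip() for line in input_lines[start:end]]
-- ===== Notes on version B (the rewrite author's own statement) =====
-- stated objective: alternative
-- what changed: Replaces A's stateful streaming loop by an index-and-slice formulation: precompute each line's first token, locate the <comments>/</comments> tag positions with list.index, and return the stripped slice between them.
import Mathlib
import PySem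

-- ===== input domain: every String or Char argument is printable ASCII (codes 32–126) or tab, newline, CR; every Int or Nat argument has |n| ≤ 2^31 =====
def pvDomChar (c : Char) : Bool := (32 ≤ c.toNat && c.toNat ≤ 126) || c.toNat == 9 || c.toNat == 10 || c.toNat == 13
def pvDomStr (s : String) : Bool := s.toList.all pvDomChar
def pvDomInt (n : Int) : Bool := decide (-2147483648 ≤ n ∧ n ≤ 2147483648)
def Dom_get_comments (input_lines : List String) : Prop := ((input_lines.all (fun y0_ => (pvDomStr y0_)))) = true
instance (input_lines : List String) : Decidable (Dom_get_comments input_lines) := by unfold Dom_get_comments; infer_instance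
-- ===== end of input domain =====

set_option maxHeartbeats 1000000


-- B replaces A's stateful streaming loop by an index-and-slice formulation (find the tag
-- positions with list.index, return the stripped slice between them); objective: alternative.

-- ===== PORT A =====
-- len(line_list) > 0 and line_list[0] == tag  (line_list = line.strip().split())
def pvTokA (line tag : String) : Bool :=
  let ll := PySem.Str.split₀ (PySem.Str.strip line)
  decide (ll.length > 0) && (PySem.List.pyGet? ll 0 == some tag)

-- A's for-loop with `break`, as structural recursion over the same state
-- (comment_started flag, accumulated comments list).
def pvLoopA : List String → Bool → List String → List String
  | [], _, comments => comments
  | line :: rest, started, comments =>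
    if !started && pvTokA line "<comments>" then
      pvLoopA rest true comments
    else if started then
      if pvTokA line "</comments>" then
        comments  -- break
      else
        pvLoopA rest started (comments ++ [PySem.Str.strip line])
    else
      pvLoopA rest started comments

def get_comments (input_lines : List String) : List String :=
  pvLoopA input_lines false []

-- ===== PORT B =====
-- line.strip().split()[:1]   ([:1] with nonneg bound is List.take 1; exact)
def pvTok (line : String) : List String :=
  (PySem.Str.split₀ (PySem.Str.strip line)).take 1

def get_comments_alt (input_lines : List String) : List String :=
  let tokens := input_lines.map pvTok
  if tokens.contains ["<comments>"] then
    -- tokens.index(['<comments>']): membership guaranteed by the guard, so index? is some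
    let start := (PySem.List.index? tokens ["<comments>"]).getD 0 + 1
    let tail := PySem.List.slice tokens (some (start : Int)) none
    let stop := if tail.contains ["</comments>"] then
        start + (PySem.List.index? tail ["</comments>"]).getD 0
      else input_lines.length
    (PySem.List.slice input_lines (some (start : Int)) (some (stop : Int))).map PySem.Str.strip
  else []

-- ===== PRECONDITION & SPEC =====
def Spec_get_comments (input_lines : List String) (out : List String) : Prop := out = get_comments_alt input_lines
instance (input_lines : List String) (out : List String) : Decidable (Spec_get_comments input_lines out) := by unfold Spec_get_comments; infer_instance

-- ===== CLAIM =====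
def Claim_equal_get_comments : Prop := ∀ (input_lines : List String), Dom_get_comments input_lines → Spec_get_comments input_lines (get_comments input_lines)

-- ===== LEMMAS AND PROOFS =====

-- A's `len > 0 ∧ ll[0] == tag` test coincides with B's first-token comparison.
theorem pvTok_eq (line t : String) : (pvTok line == [t]) = pvTokA line t := by
  unfold pvTok pvTokA
  cases PySem.Str.split₀ (PySem.Str.strip line) with
  | nil => simp
  | cons a l => simp [PySem.List.pyGet?, PySem.List.pyIdx?]

-- A's started-phase loop collects stripped lines up to the end tag:
-- no end tag → all lines; end tag at index j → the first j lines.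
theorem pvLoopA_true_no_end (xs : List String)
    (h : ["</comments>"] ∉ xs.map pvTok) : ∀ acc,
    pvLoopA xs true acc = acc ++ xs.map PySem.Str.strip := by
  induction xs with
  | nil => intro acc; simp [pvLoopA]
  | cons line rest ih =>
    intro acc
    simp only [List.map_cons, List.mem_cons, not_or] at h
    have hne : pvTokA line "</comments>" = false := by
      rw [← pvTok_eq]
      exact beq_eq_false_iff_ne.mpr (Ne.symm h.1)
    simp only [pvLoopA, Bool.not_true, Bool.false_and, if_false, if_true, hne,
      Bool.false_eq_true]
    rw [ih h.2]
    simp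

theorem pvLoopA_true_end (xs : List String) (j : Nat)
    (h : PySem.List.index? (xs.map pvTok) ["</comments>"] = some j) : ∀ acc,
    pvLoopA xs true acc = acc ++ (xs.take j).map PySem.Str.strip := by
  induction xs generalizing j with
  | nil => simp [PySem.List.index?] at h
  | cons line rest ih =>
    intro acc
    by_cases he : pvTok line = ["</comments>"]
    · rw [List.map_cons, he, PySem.List.index?_cons_self] at h
      obtain rfl : (0 : Nat) = j := Option.some.inj h
      have ht : pvTokA line "</comments>" = true := by
        rw [← pvTok_eq, he]; simp
      simp [pvLoopA, ht]
    · rw [List.map_cons, PySem.List.index?_cons_of_ne _ he] at h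
      obtain ⟨j', hj', rfl⟩ := Option.map_eq_some_iff.mp h
      have hne : pvTokA line "</comments>" = false := by
        rw [← pvTok_eq]
        exact beq_eq_false_iff_ne.mpr he
      simp only [pvLoopA, Bool.not_true, Bool.false_and, if_false, if_true, hne,
        Bool.false_eq_true]
      rw [ih j' hj']
      simp

-- A's not-yet-started phase skips up to the start tag; no start tag → result [].
theorem pvLoopA_false_no_start (xs : List String)
    (h : ["<comments>"] ∉ xs.map pvTok) :
    pvLoopA xs false [] = [] := by
  induction xs with
  | nil => simp [pvLoopA]
  | cons line rest ih =>
    simp only [List.map_cons, List.mem_cons, not_or] at h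
    have hne : pvTokA line "<comments>" = false := by
      rw [← pvTok_eq]
      exact beq_eq_false_iff_ne.mpr (Ne.symm h.1)
    simpa [pvLoopA, hne] using ih h.2

theorem pvLoopA_false_start (xs : List String) (i : Nat)
    (h : PySem.List.index? (xs.map pvTok) ["<comments>"] = some i) :
    pvLoopA xs false [] = pvLoopA (xs.drop (i + 1)) true [] := by
  induction xs generalizing i with
  | nil => simp [PySem.List.index?] at h
  | cons line rest ih =>
    by_cases he : pvTok line = ["<comments>"]
    · rw [List.map_cons, he, PySem.List.index?_cons_self] at h
      obtain rfl : (0 : Nat) = i := Option.some.inj h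
      have ht : pvTokA line "<comments>" = true := by
        rw [← pvTok_eq, he]; simp
      simp [pvLoopA, ht]
    · rw [List.map_cons, PySem.List.index?_cons_of_ne _ he] at h
      obtain ⟨i', hi', rfl⟩ := Option.map_eq_some_iff.mp h
      have hne : pvTokA line "<comments>" = false := by
        rw [← pvTok_eq]
        exact beq_eq_false_iff_ne.mpr he
      simpa [pvLoopA, hne] using ih i' hi'

-- ===== VERDICT =====
theorem get_comments_spec : Claim_equal_get_comments := by
  intro xs _
  show get_comments xs = get_comments_alt xs
  unfold get_comments get_comments_alt
  by_cases hmem : ["<comments>"] ∈ xs.map pvTok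
  · obtain ⟨i, hi⟩ :=
      Option.isSome_iff_exists.mp ((PySem.List.index?_isSome_iff _ _).mpr hmem)
    rw [pvLoopA_false_start xs i hi]
    simp only [List.contains_eq_mem, hmem, decide_true, if_pos, hi, Option.getD_some]
    rw [PySem.List.slice_from_natCast]
    have hdropmap : (xs.map pvTok).drop (i + 1) = (xs.drop (i + 1)).map pvTok := by
      simp [List.map_drop]
    by_cases hend : ["</comments>"] ∈ (xs.map pvTok).drop (i + 1)
    · obtain ⟨j, hj⟩ :=
        Option.isSome_iff_exists.mp ((PySem.List.index?_isSome_iff _ _).mpr hend)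
      have hj' : PySem.List.index? ((xs.drop (i + 1)).map pvTok) ["</comments>"] = some j := by
        rw [← hdropmap]; exact hj
      rw [pvLoopA_true_end _ j hj']
      simp only [List.contains_eq_mem, hend, decide_true, if_pos, hj, Option.getD_some,
        List.nil_append]
      have hc : ((i + 1 + j : Nat) : Int) = ((i + 1 : Nat) : Int) + (j : Int) := by
        push_cast; ring
      rw [hc, PySem.List.slice_natCast_add]
    · have hend' : ["</comments>"] ∉ (xs.drop (i + 1)).map pvTok := by
        rw [← hdropmap]; exact hend
      rw [pvLoopA_true_no_end _ hend']
      simp only [List.contains_eq_mem, hend, decide_false, if_neg, List.nil_append,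
        Bool.false_eq_true, if_false]
      rw [PySem.List.slice_natCast]
      have htake : (xs.drop (i + 1)).take (xs.length - (i + 1)) = xs.drop (i + 1) := by
        apply List.take_of_length_le; simp
      rw [htake]
  · rw [pvLoopA_false_no_start xs hmem]
    simp [hmem]
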